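-- pv_equiv track=rewrite | github.com/russon77/daily-programmer-reddit | 261e/main.py | possibly_magic
-- ===== SOURCE A (Python) =====
-- import functools
--
-- def is_magic(grid):
--     """
--     compute whether the input grid is a magic square: i.e. each row, column and major diagonal adds up to 15
--     :param grid: input grid
--     :return: boolean
--     """
--     n = len(grid)
--     target = int(n * (n**2 + 1) / 2)
--
--     # check row-wise
--     for row in grid:
--         if sum(row) != target:
--             return False
--
--     # check column wise
--     for col in range(0, len(grid)):
--         if sum([grid[row][col] for row in range(0, len(grid[col]))]) != target:
--             return False
--
--     # check diagonals
--     if sum([grid[k][k] for k in range(0, len(grid))]) != target: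
--         return False
--
--     if sum([grid[k][len(grid) - 1 - k] for k in range(0, len(grid))]) != target:
--         return False
--
--     return True
--
-- def all_unique(grid):
--     """
--     test whether every entry in this grid is unique, and return accordinly
--     :param grid: input rowxcol grid
--     :return: boolean: true if every entry is unique
--     """
--     entries = {}
--     for row in grid:
--         for num in row:
--             if num in entries:
--                 return False
--
--             entries[num] = True
--
--     return True
--
-- def possibly_magic(grid):
--     """
--     given a grid of Rows x Cols, such that Rows = (Cols - 1): return True if the grid could be a magic square and False
--     otherwise
--     :param grid: almost-square grid, where # rows = # cols - 1
--     :return: boolean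
--     """
--     n = len(grid[0])
--     target = int(n * (n ** 2 + 1) / 2)
--
--     last_row = []
--
--     # for each column, find the number missing
--     for col in range(0, n):
--         val = functools.reduce(lambda x, y: x + y, [grid[row][col] for row in range(0, len(grid))])
--         last_row.append(target - val)
--
--     grid.append(last_row)
--     if all_unique(grid) and is_magic(grid):
--         return True
--
--     return False
-- ===== SOURCE B (Python) =====
-- def possibly_magic(grid):
--     """
--     Idiomatic rewrite: build the missing last row from a zip(*grid) transpose and
--     append it (same mutation as the original), then verify with sorted-adjacency
--     uniqueness, one row-sum pass and enumerate-based diagonals; no column pass is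
--     needed because every column sums to the target by construction.
--     """
--     n = len(grid[0])
--     target = n * (n * n + 1) // 2
--     cols = list(zip(*grid))[:n]
--     last_row = [target - sum(c) for c in cols]
--     grid.append(last_row)
--
--     flat = sorted(v for row in grid for v in row)
--     if any(x == y for x, y in zip(flat, flat[1:])):
--         return False
--     if any(sum(row) != target for row in grid):
--         return False
--     d1 = sum(row[i] for i, row in enumerate(grid))
--     d2 = sum(row[n - 1 - i] for i, row in enumerate(grid))
--     return d1 == target and d2 == target
-- ===== Notes on version B (the rewrite author's own statement) =====
-- stated objective: idiomatic
-- what changed: B builds the missing last row from a zip(*grid) transpose instead of A's per-column index loops, tests uniqueness by sorting the flattened entries and scanning adjacent pairs instead of A's nested dict loops, checks diagonals via enumerate, and drops A's column-sum re-check entirely (columns hold by construction); Pre_ excludes wrongly-shaped (non almost-square) grids whose early-False is not forced by the input alone, since there A's value (False or IndexError) is an accident of how far its index-heavy checks get.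
-- outside the precondition, e.g. on possibly_magic([[]]): A returns False, B raises IndexError; on possibly_magic([[4, 5, 6]]): A returns False, B returns False
import Mathlib
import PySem

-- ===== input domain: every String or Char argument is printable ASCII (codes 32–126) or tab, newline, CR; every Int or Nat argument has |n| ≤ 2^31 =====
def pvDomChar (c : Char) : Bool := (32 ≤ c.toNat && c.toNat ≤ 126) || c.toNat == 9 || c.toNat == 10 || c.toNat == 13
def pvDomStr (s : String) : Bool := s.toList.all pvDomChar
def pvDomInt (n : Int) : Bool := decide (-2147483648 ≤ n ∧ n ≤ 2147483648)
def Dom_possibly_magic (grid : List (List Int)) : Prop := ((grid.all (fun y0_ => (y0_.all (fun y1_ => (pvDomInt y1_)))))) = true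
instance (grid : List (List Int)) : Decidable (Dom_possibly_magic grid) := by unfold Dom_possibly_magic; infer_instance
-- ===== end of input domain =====

-- B keeps A's append-the-reconstructed-last-row step (and its mutation of grid) but builds the
-- row from a zip(*grid) transpose and verifies with sorted-adjacency uniqueness, one row-sum
-- pass and enumerate-based diagonals, with no column pass (columns hold by construction);
-- objective: idiomatic. Equivalence is about the return value; both append the same row to grid.


-- ===== PORT A =====
-- [grid[row][col] for row in range(cnt)] (all indices in range under Pre_, so getD is exact)
def pvColVals (g : List (List Int)) (col cnt : Nat) : List Int :=
  (List.range cnt).map (fun r => (g.getD r []).getD col 0)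

-- inner loop of all_unique over one row: the dict is used purely as a set of seen keys,
-- transliterated as the list of keys in insertion order (none = the early `return False`)
def pvAllUniqueRow : List Int → List Int → Option (List Int)
  | [], seen => some seen
  | x :: rest, seen => if x ∈ seen then none else pvAllUniqueRow rest (seen ++ [x])
def pvAllUnique : List (List Int) → List Int → Bool
  | [], _ => true
  | r :: rs, seen =>
    match pvAllUniqueRow r seen with
    | none => false
    | some s => pvAllUnique rs s
def pvIsMagic (g : List (List Int)) : Bool :=
  let n := g.length
  let target : Int := ((n * (n ^ 2 + 1) / 2 : Nat) : Int)
  (g.all (fun row => row.sum == target)) &&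
  ((List.range g.length).all (fun col =>
      (pvColVals g col (g.getD col []).length).sum == target)) &&
  (((List.range g.length).map (fun k => (g.getD k []).getD k 0)).sum == target) &&
  (((List.range g.length).map (fun k => (g.getD k []).getD (g.length - 1 - k) 0)).sum == target)

def possibly_magic (grid : List (List Int)) : Bool :=
  let n := (grid.getD 0 []).length
  let target : Int := ((n * (n ^ 2 + 1) / 2 : Nat) : Int)
  let last_row := (List.range n).map (fun col => target - (pvColVals grid col grid.length).sum)
  let grid2 := grid ++ [last_row]
  pvAllUnique grid2 [] && pvIsMagic grid2

-- ===== PORT B =====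
-- zip(*g): one column per index below the minimum row length (indices in range, so getD exact)
def pvZipStar (g : List (List Int)) : List (List Int) :=
  match (g.map List.length).min? with
  | none => []
  | some m => (List.range m).map (fun c => g.map (fun row => row.getD c 0))

def possibly_magic_alt (grid : List (List Int)) : Bool :=
  let n := (grid.getD 0 []).length
  let target : Int := ((n * (n * n + 1) / 2 : Nat) : Int)
  let cols := (pvZipStar grid).take n
  let last_row := cols.map (fun c => target - c.sum)
  let g := grid ++ [last_row]
  let flat := PySem.List.sorted (g.flatMap id) (fun x => x) false
  if (flat.zip (flat.drop 1)).any (fun p => p.1 == p.2) then false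
  else if g.any (fun row => row.sum != target) then false
  else
    (((PySem.List.enumerate g 0).map (fun p => PySem.List.pyGetD p.2 p.1 0)).sum == target) &&
    (((PySem.List.enumerate g 0).map (fun p => PySem.List.pyGetD p.2 ((n : Int) - 1 - p.1) 0)).sum == target)

-- ===== PRECONDITION & SPEC =====
-- Pre_ admits nonempty grids (no row shorter than the first) on which A's result is
-- determined by the input alone: the documented almost-square shape (# rows = # cols - 1,
-- equal-length rows), or any grid with a duplicate entry (all_unique short-circuits to
-- False), or any grid with a row missing both shapes' magic targets (is_magic's row pass
-- returns False); on the remaining wrongly-shaped grids A's outcome (False or IndexError)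
-- is an accident of how far its index-heavy checks get.
def Pre_possibly_magic (grid : List (List Int)) : Prop :=
  grid ≠ [] ∧ (∀ row ∈ grid, (grid.headD []).length ≤ row.length) ∧
    ((grid.length + 1 = (grid.headD []).length ∧
        ∀ row ∈ grid, row.length = (grid.headD []).length) ∨
     ¬ grid.flatten.Nodup ∨
     ((∃ row ∈ grid, row.sum ≠
         (((grid.length + 1) * ((grid.length + 1) ^ 2 + 1) / 2 : Nat) : Int)) ∧
      (∃ row ∈ grid, row.sum ≠
         (((grid.headD []).length * ((grid.headD []).length ^ 2 + 1) / 2 : Nat) : Int))))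
instance (grid : List (List Int)) : Decidable (Pre_possibly_magic grid) := by
  unfold Pre_possibly_magic; infer_instance
def pvWitness_possibly_magic : List (List Int) := [[8, 1, 6], [3, 5, 7]]

def Spec_possibly_magic (grid : List (List Int)) (out : Bool) : Prop := out = possibly_magic_alt grid
instance (grid : List (List Int)) (out : Bool) : Decidable (Spec_possibly_magic grid out) := by unfold Spec_possibly_magic; infer_instance

-- ===== CLAIM (what is proved, stated in full; the proofs are below) =====
def Claim_equal_possibly_magic : Prop := ∀ (grid : List (List Int)), Dom_possibly_magic grid → Pre_possibly_magic grid → Spec_possibly_magic grid (possibly_magic grid)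

-- ===== LEMMAS AND PROOFS =====

theorem pvAllUniqueRow_eq (r : List Int) (seen : List Int) :
    pvAllUniqueRow r seen =
      if r.Nodup ∧ (∀ x ∈ r, x ∉ seen) then some (seen ++ r) else none := by
  induction r generalizing seen with
  | nil => simp [pvAllUniqueRow]
  | cons x rest ih =>
    by_cases hx : x ∈ seen
    · simp [pvAllUniqueRow, hx]
    · rw [pvAllUniqueRow, if_neg hx, ih]
      have hiff : (rest.Nodup ∧ ∀ y ∈ rest, y ∉ seen ++ [x]) ↔
          ((x :: rest).Nodup ∧ ∀ y ∈ x :: rest, y ∉ seen) := by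
        simp only [List.nodup_cons, List.mem_append, List.mem_cons]
        constructor
        · rintro ⟨h1, h2⟩
          refine ⟨⟨fun hm => (h2 x hm) (Or.inr (Or.inl rfl)), h1⟩, ?_⟩
          rintro y (rfl | hy)
          · exact hx
          · exact fun hs => h2 y hy (Or.inl hs)
        · rintro ⟨⟨hxr, h1⟩, h2⟩
          refine ⟨h1, fun y hy => ?_⟩
          rintro (hs | rfl | h0)
          · exact h2 y (Or.inr hy) hs
          · exact hxr hy
          · exact absurd h0 (List.not_mem_nil)
      rw [if_congr hiff rfl rfl]
      split_ifs with h
      · simp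
      · rfl

theorem pvAllUnique_iff (gs : List (List Int)) (seen : List Int) :
    pvAllUnique gs seen = true ↔ gs.flatten.Nodup ∧ ∀ x ∈ gs.flatten, x ∉ seen := by
  induction gs generalizing seen with
  | nil => simp [pvAllUnique]
  | cons r rs ih =>
    rw [pvAllUnique, pvAllUniqueRow_eq]
    split_ifs with h
    · rw [ih]
      simp only [List.flatten_cons, List.nodup_append, List.mem_append]
      constructor
      · rintro ⟨hn, hs⟩
        exact ⟨⟨h.1, hn, fun a ha b hb hab => hs b hb (Or.inr (hab ▸ ha))⟩,
          fun x hx => hx.elim (fun hr => h.2 x hr) (fun hf hsx => hs x hf (Or.inl hsx))⟩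
      · rintro ⟨⟨hnr, hnrs, hd⟩, hs⟩
        exact ⟨hnrs, fun x hx hmem =>
          hmem.elim (fun hsx => hs x (Or.inr hx) hsx) (fun hxr => hd x hxr x hx rfl)⟩
    · simp only [false_iff]
      rintro ⟨hn, hs⟩
      rw [List.flatten_cons, List.nodup_append] at hn
      exact h ⟨hn.1, fun x hx => hs x (List.mem_append_left _ hx)⟩

-- a ≤-sorted list has some equal adjacent pair iff it has a duplicate
theorem pvAdjAux (s : List Int) (h : s.Pairwise (· ≤ ·)) :
    ((s.zip (s.drop 1)).any (fun p => p.1 == p.2) = false) ↔ s.Nodup := by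
  induction s with
  | nil => simp
  | cons a t ih =>
    cases t with
    | nil => simp
    | cons b t' =>
      have h1 : ∀ x ∈ b :: t', a ≤ x := (List.pairwise_cons.mp h).1
      have h2 : (b :: t').Pairwise (· ≤ ·) := (List.pairwise_cons.mp h).2
      have hrec := ih h2
      simp only [List.drop_succ_cons, List.drop_zero] at hrec
      simp only [List.drop_succ_cons, List.drop_zero, List.zip_cons_cons, List.any_cons,
        Bool.or_eq_false_iff, beq_eq_false_iff_ne, ne_eq]
      constructor
      · rintro ⟨hab, hrest⟩
        have hnd' : (b :: t').Nodup := hrec.mp hrest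
        rw [List.nodup_cons]
        refine ⟨fun hmem => ?_, hnd'⟩
        rcases List.mem_cons.mp hmem with rfl | ha
        · exact hab rfl
        · have hba : b ≤ a := (List.pairwise_cons.mp h2).1 a ha
          have hab' : a ≤ b := h1 b List.mem_cons_self
          exact hab (le_antisymm hab' hba)
      · intro hnd
        rw [List.nodup_cons] at hnd
        exact ⟨fun hab => hnd.1 (hab ▸ List.mem_cons_self), hrec.mpr hnd.2⟩

-- Python's sorted-adjacency duplicate test, related to Nodup of the unsorted list
theorem pvSortedAdj_iff (l : List Int) :
    (((PySem.List.sorted l (fun x => x) false).zip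
        ((PySem.List.sorted l (fun x => x) false).drop 1)).any (fun p => p.1 == p.2) = false)
      ↔ l.Nodup := by
  rw [pvAdjAux _ (PySem.List.sorted_pairwise l (fun x => x))]
  exact (PySem.List.sorted_perm l (fun x => x) false).nodup_iff

-- sum over enumerate(grid) of row[f i] equals the index-loop form
theorem pvEnumMap (g : List (List Int)) (f : Int → Int) :
    (PySem.List.enumerate g 0).map (fun p => PySem.List.pyGetD p.2 (f p.1) 0)
      = (List.range g.length).map (fun k => PySem.List.pyGetD (g.getD k []) (f (k : Int)) 0) := by
  apply List.ext_getElem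
  · simp [PySem.List.length_enumerate]
  · intro i h1 h2
    have hi : i < g.length := by simpa [PySem.List.length_enumerate] using h1
    simp [PySem.List.getElem_enumerate, List.getD_eq_getElem?_getD, List.getElem?_eq_getElem hi]

-- a column of the zip(*g) transpose is the index-loop column
theorem pvColOfMap (g : List (List Int)) (c : Nat) :
    g.map (fun row => row.getD c 0) = pvColVals g c g.length := by
  apply List.ext_getElem
  · simp [pvColVals]
  · intro i h1 h2
    have hi : i < g.length := by simpa using h1
    simp [pvColVals, List.getD_eq_getElem?_getD, List.getElem?_eq_getElem hi]

-- the first n columns of zip(*g), when every row has at least n entries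
theorem pvZipStarTake (g : List (List Int)) (n : Nat) (hne : g ≠ [])
    (hlen : ∀ row ∈ g, n ≤ row.length) :
    (pvZipStar g).take n = (List.range n).map (fun c => g.map (fun row => row.getD c 0)) := by
  unfold pvZipStar
  cases hm : (g.map List.length).min? with
  | none =>
    rw [List.min?_eq_none_iff] at hm
    exact absurd (List.map_eq_nil_iff.mp hm) hne
  | some m =>
    have hmem : m ∈ g.map List.length := List.min?_mem hm
    obtain ⟨row, hrow, hrl⟩ := List.mem_map.mp hmem
    have hnm : n ≤ m := hrl ▸ hlen row hrow
    rw [← List.map_take, List.take_range, Nat.min_eq_left hnm]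

-- each column of grid ++ [last_row] sums to target, by construction of last_row
theorem cols_sum (grid : List (List Int)) (target : Int) (n col : Nat)
    (h : col < n) :
    (pvColVals (grid ++ [(List.range n).map
        (fun c => target - (pvColVals grid c grid.length).sum)]) col (grid.length + 1)).sum
      = target := by
  set lr := (List.range n).map (fun c => target - (pvColVals grid c grid.length).sum) with hlr
  have h1 : pvColVals (grid ++ [lr]) col (grid.length + 1)
      = pvColVals grid col grid.length ++ [lr.getD col 0] := by
    unfold pvColVals
    rw [List.range_succ, List.map_append]
    congr 1
    · exact List.map_congr_left (fun r hr => by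
        rw [List.getD_append _ _ _ _ (List.mem_range.mp hr)])
    · simp [List.getD_eq_getElem?_getD]
  have h2 : lr.getD col 0 = target - (pvColVals grid col grid.length).sum := by
    rw [hlr, List.getD_eq_getElem?_getD, List.getElem?_map, List.getElem?_range h]
    rfl
  rw [h1, h2, List.sum_append]
  simp

theorem pv_main (grid : List (List Int)) (hne : grid ≠ [])
    (hrowlen : ∀ row ∈ grid, (grid.headD []).length ≤ row.length)
    (hdisj : (grid.length + 1 = (grid.headD []).length ∧
        ∀ row ∈ grid, row.length = (grid.headD []).length) ∨
      ¬ grid.flatten.Nodup ∨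
      ((∃ row ∈ grid, row.sum ≠
          (((grid.length + 1) * ((grid.length + 1) ^ 2 + 1) / 2 : Nat) : Int)) ∧
       (∃ row ∈ grid, row.sum ≠
          (((grid.headD []).length * ((grid.headD []).length ^ 2 + 1) / 2 : Nat) : Int)))) :
    possibly_magic grid = possibly_magic_alt grid := by
  obtain ⟨r0, rs, rfl⟩ : ∃ r0 rs, grid = r0 :: rs := by
    cases grid with
    | nil => exact absurd rfl hne
    | cons a l => exact ⟨a, l, rfl⟩
  simp only [List.headD_cons] at hdisj hrowlen
  set n := r0.length with hn
  set t : Int := ((n * (n ^ 2 + 1) / 2 : Nat) : Int) with ht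
  set G := (r0 :: rs) ++ [(List.range n).map
      (fun c => t - (pvColVals (r0 :: rs) c (r0 :: rs).length).sum)] with hG
  have hGlen2 : G.length = (r0 :: rs).length + 1 := by
    rw [hG, List.length_append]
    rfl
  have htB : ((n * (n * n + 1) / 2 : Nat) : Int) = t := by
    rw [ht]
    norm_num [pow_two]
  -- B's transpose-built last row is A's last row (every row has ≥ n entries)
  have hlrB : ((pvZipStar (r0 :: rs)).take n).map (fun c => t - c.sum)
      = (List.range n).map (fun c => t - (pvColVals (r0 :: rs) c (r0 :: rs).length).sum) := by
    rw [pvZipStarTake (r0 :: rs) n (by simp) hrowlen, List.map_map]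
    exact List.map_congr_left (fun c _ => by rw [Function.comp_apply, pvColOfMap])
  -- the B-side if-chain, with its let-bindings resolved to G and t
  have hBdef : possibly_magic_alt (r0 :: rs) =
      (let flat := PySem.List.sorted (G.flatMap id) (fun x => x) false
       if (flat.zip (flat.drop 1)).any (fun p => p.1 == p.2) then false
       else if G.any (fun row => row.sum != t) then false
       else
         (((PySem.List.enumerate G 0).map (fun p => PySem.List.pyGetD p.2 p.1 0)).sum == t) &&
         (((PySem.List.enumerate G 0).map
             (fun p => PySem.List.pyGetD p.2 ((n : Int) - 1 - p.1) 0)).sum == t)) := by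
    rw [possibly_magic_alt]
    simp only [List.getD_cons_zero, ← hn, htB, hlrB, ← hG]
  have hflatid : G.flatMap id = G.flatten := List.flatMap_id
  by_cases hnd : G.flatten.Nodup
  · have hAdj : ((PySem.List.sorted (G.flatMap id) (fun x => x) false).zip
        ((PySem.List.sorted (G.flatMap id) (fun x => x) false).drop 1)).any
          (fun p => p.1 == p.2) = false := by
      rw [hflatid, pvSortedAdj_iff]
      exact hnd
    rcases hdisj with ⟨hlen, hrows⟩ | hdup | ⟨⟨rA, hrA, hsA⟩, ⟨rB, hrB, hsB⟩⟩
    · -- the documented almost-square shape: full verification on both sides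
      have hGlen : G.length = n := by rw [hGlen2, hlen]
      have hGrows : ∀ row ∈ G, row.length = n := by
        intro row hr
        rcases List.mem_append.mp hr with hm | hm
        · exact hrows row hm
        · simp only [List.mem_singleton] at hm
          simp [hm]
      have hcols : ∀ col < n, (pvColVals G col ((r0 :: rs).length + 1)).sum = t :=
        fun col hc => cols_sum (r0 :: rs) t n col hc
      have hA : (possibly_magic (r0 :: rs) = true) ↔
          (G.flatten.Nodup ∧ (∀ row ∈ G, row.sum = t) ∧
            ((List.range n).map (fun k => (G.getD k []).getD k 0)).sum = t ∧
            ((List.range n).map (fun k => (G.getD k []).getD (n - 1 - k) 0)).sum = t) := by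
        show (pvAllUnique G [] && pvIsMagic G) = true ↔ _
        rw [Bool.and_eq_true, pvAllUnique_iff]
        simp only [List.not_mem_nil, not_false_iff, imp_true_iff, and_true]
        constructor
        · rintro ⟨hnd', hm⟩
          rw [pvIsMagic] at hm
          simp only [hGlen, Bool.and_eq_true, List.all_eq_true, beq_iff_eq] at hm
          exact ⟨hnd', hm.1.1.1, hm.1.2, hm.2⟩
        · rintro ⟨hnd', hrow, hd1, hd2⟩
          refine ⟨hnd', ?_⟩
          rw [pvIsMagic]
          simp only [hGlen, Bool.and_eq_true, List.all_eq_true, beq_iff_eq]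
          refine ⟨⟨⟨hrow, ?_⟩, hd1⟩, hd2⟩
          intro col hc
          have hcn : col < n := List.mem_range.mp hc
          have hmem : G.getD col [] ∈ G := by
            have hlt : col < G.length := by omega
            rw [List.getD_eq_getElem?_getD, List.getElem?_eq_getElem hlt]
            exact List.getElem_mem hlt
          have hl : (G.getD col []).length = n := hGrows _ hmem
          rw [hl]
          have h' := hcols col hcn
          rw [hlen] at h'
          exact h'
      -- B's enumerate diagonals in index-loop form
      have hD1 : ((PySem.List.enumerate G 0).map (fun p => PySem.List.pyGetD p.2 p.1 0)).sum
          = ((List.range n).map (fun k => (G.getD k []).getD k 0)).sum := by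
        rw [pvEnumMap G (fun i => i), hGlen]
        exact congrArg List.sum (List.map_congr_left (fun k _ => by
          simp [PySem.List.pyGetD_natCast]))
      have hD2 : ((PySem.List.enumerate G 0).map
            (fun p => PySem.List.pyGetD p.2 ((n : Int) - 1 - p.1) 0)).sum
          = ((List.range n).map (fun k => (G.getD k []).getD (n - 1 - k) 0)).sum := by
        rw [pvEnumMap G (fun i => (n : Int) - 1 - i), hGlen]
        refine congrArg List.sum (List.map_congr_left (fun k hk => ?_))
        have hkn : k < n := List.mem_range.mp hk
        have hcast : (n : Int) - 1 - (k : Int) = ((n - 1 - k : Nat) : Int) := by omega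
        rw [hcast, PySem.List.pyGetD_natCast]
      have hB : (possibly_magic_alt (r0 :: rs) = true) ↔
          (G.flatten.Nodup ∧ (∀ row ∈ G, row.sum = t) ∧
            ((List.range n).map (fun k => (G.getD k []).getD k 0)).sum = t ∧
            ((List.range n).map (fun k => (G.getD k []).getD (n - 1 - k) 0)).sum = t) := by
        rw [hBdef]
        simp only [hAdj, Bool.false_eq_true, if_false, hD1, hD2]
        split_ifs with h2
        · simp only [false_iff]
          rintro ⟨-, hrow, -⟩
          simp only [List.any_eq_true, bne_iff_ne] at h2
          obtain ⟨row, hr, hne'⟩ := h2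
          exact hne' (hrow row hr)
        · simp only [Bool.and_eq_true, beq_iff_eq]
          constructor
          · rintro ⟨hd1, hd2⟩
            refine ⟨hnd, ?_, hd1, hd2⟩
            intro row hr
            by_contra hne'
            exact h2 (List.any_eq_true.mpr ⟨row, hr, bne_iff_ne.mpr hne'⟩)
          · rintro ⟨-, -, hd1, hd2⟩
            exact ⟨hd1, hd2⟩
      rw [Bool.eq_iff_iff, hA, hB]
    · refine absurd ?_ hdup
      have hflat : G.flatten = (r0 :: rs).flatten ++ (List.range n).map
          (fun c => t - (pvColVals (r0 :: rs) c (r0 :: rs).length).sum) := by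
        rw [hG, List.flatten_append]
        simp
      rw [hflat] at hnd
      exact hnd.sublist (List.sublist_append_left _ _)
    · -- a row misses both magic targets: A's row pass and B's row gate both yield False
      have hAfalse : possibly_magic (r0 :: rs) = false := by
        show (pvAllUnique G [] && pvIsMagic G) = false
        have hm : pvIsMagic G = false := by
          simp only [pvIsMagic, hGlen2]
          have hall : G.all (fun row => row.sum ==
              ((((r0 :: rs).length + 1) * (((r0 :: rs).length + 1) ^ 2 + 1) / 2 : Nat) : Int))
              = false := by
            rw [← Bool.not_eq_true, List.all_eq_true]
            intro hallt
            have h' := hallt rA (by rw [hG]; exact List.mem_append_left _ hrA)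
            rw [beq_iff_eq] at h'
            exact hsA h'
          rw [hall]
          simp
        rw [hm, Bool.and_false]
      have hBfalse : possibly_magic_alt (r0 :: rs) = false := by
        rw [hBdef]
        simp only [hAdj, Bool.false_eq_true, if_false]
        rw [if_pos]
        exact List.any_eq_true.mpr
          ⟨rB, by rw [hG]; exact List.mem_append_left _ hrB, bne_iff_ne.mpr hsB⟩
      rw [hAfalse, hBfalse]
  · -- a duplicate entry: A's all_unique and B's sorted-adjacency gate both yield False
    have hAfalse : possibly_magic (r0 :: rs) = false := by
      show (pvAllUnique G [] && pvIsMagic G) = false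
      have hu : pvAllUnique G [] = false := by
        rw [← Bool.not_eq_true, pvAllUnique_iff]
        simp only [List.not_mem_nil, not_false_iff, imp_true_iff, and_true]
        exact hnd
      rw [hu, Bool.false_and]
    have hBfalse : possibly_magic_alt (r0 :: rs) = false := by
      rw [hBdef]
      rw [if_pos]
      rw [← Bool.not_eq_false, hflatid, pvSortedAdj_iff]
      exact hnd
    rw [hAfalse, hBfalse]

-- ===== VERDICT (by name: the statement is the Claim_ definition above) =====
theorem possibly_magic_spec : Claim_equal_possibly_magic := by
  intro grid _dom hpre
  exact pv_main grid hpre.1 hpre.2.1 hpre.2.2
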